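-- pv_equiv track=rewrite | github.com/StudyForCoding/ProgrammersLevel | Level2/Lessons17683/wowo0709.py | solution
-- ===== SOURCE A (Python) =====
-- def solution(m,musicinfos):
--     scaleList = ['C', 'C#', 'D', 'D#', 'E', 'F', 'F#', 'G', 'G#', 'A', 'A#', 'B'] # 12음계
--     numList = ['0','1','2','3','4','5','6','7','8','9','a','b'] # 12진법
--     scaleDict = dict(zip(scaleList,numList))
--     musicList = []
--     for musicinfo in musicinfos:
--         startTime, endTime, title, scales = musicinfo.split(',')
--         playtime = (int(endTime[0:2]) - int(startTime[0:2])) * 60 + (int(endTime[3:]) - int(startTime[3:]))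
--
--         for scale in scaleList[::-1]: # '#'음들을 먼저 변환해야 함
--             scales = scales.replace(scale,scaleDict[scale])
--
--         q,r = divmod(playtime,len(scales)) # 전체재생수,추가재생시간
--         scales = scales*q + scales[:r]
--
--         musicList.append([playtime,title,scales])
--
--     # m도 변환
--     for scale in scaleList[::-1]: m = m.replace(scale,scaleDict[scale])
--     # 재생시간이 긴 순으로 정답 반환 (문제 조건)
--     for playtime, title, scales in sorted(musicList,key = lambda music: music[0], reverse=True):
--         if m in scales: return title
--     return "(None)"
-- ===== SOURCE B (Python) =====
-- PAIRS = [('C', '0'), ('C#', '1'), ('D', '2'), ('D#', '3'), ('E', '4'), ('F', '5'),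
--          ('F#', '6'), ('G', '7'), ('G#', '8'), ('A', '9'), ('A#', 'a'), ('B', 'b')]
--
-- def _encode(s, rules=PAIRS):
--     # recursive: the rest of the rules are applied first, so sharp notes are
--     # encoded before their plain prefixes, exactly as required
--     if not rules:
--         return s
--     note, digit = rules[0]
--     return _encode(s, rules[1:]).replace(note, digit)
--
-- def _minutes(t):
--     return int(t[0:2]) * 60 + int(t[3:])
--
-- def _song(info):
--     start, end, title, sheet = info.split(',')
--     playtime = _minutes(end) - _minutes(start)
--     code = _encode(sheet)
--     q, r = divmod(playtime, len(code))
--     return playtime, title, code * q + code[:r]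
--
-- def solution(m, musicinfos):
--     query = _encode(m)
--     best = None  # (playtime, title) of the longest matching song so far
--     for info in musicinfos:
--         playtime, title, melody = _song(info)
--         if query in melody and (best is None or playtime > best[0]):
--             best = (playtime, title)
--     return best[1] if best is not None else "(None)"
-- ===== Notes on version B (the rewrite author's own statement) =====
-- stated objective: simpler
-- what changed: B drops A's musicList accumulation and stable descending sort, doing a single pass that keeps the best (strictly longer, first-in-order) matching song; encoding is a recursive rule application and playtime is a difference of absolute minutes instead of A's componentwise formula.
import Mathlib
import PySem

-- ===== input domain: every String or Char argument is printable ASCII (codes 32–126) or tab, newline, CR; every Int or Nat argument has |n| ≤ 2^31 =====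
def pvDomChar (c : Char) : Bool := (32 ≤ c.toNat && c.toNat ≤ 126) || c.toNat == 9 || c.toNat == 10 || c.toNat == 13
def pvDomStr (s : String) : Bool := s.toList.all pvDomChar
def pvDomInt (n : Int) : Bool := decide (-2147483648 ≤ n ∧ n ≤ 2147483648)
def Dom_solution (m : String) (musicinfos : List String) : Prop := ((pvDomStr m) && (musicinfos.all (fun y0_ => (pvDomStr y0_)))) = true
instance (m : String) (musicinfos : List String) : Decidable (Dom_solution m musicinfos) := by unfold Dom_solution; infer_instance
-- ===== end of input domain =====

-- B replaces A's "collect all songs, stable-sort by playtime descending, return the first match"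
-- by a single pass keeping the best (strictly longer, first-in-order) matching song. Objective: simpler.

-- ===== PORT A =====
-- scaleList[::-1] paired with its scaleDict value (dict(zip(scaleList, numList)) looked up at each scale)
def pvScaleRev : List (List Char × List Char) :=
  [(['B'],['b']), (['A','#'],['a']), (['A'],['9']), (['G','#'],['8']), (['G'],['7']),
   (['F','#'],['6']), (['F'],['5']), (['E'],['4']), (['D','#'],['3']), (['D'],['2']),
   (['C','#'],['1']), (['C'],['0'])]

-- for scale in scaleList[::-1]: s = s.replace(scale, scaleDict[scale])
def pvEncode (s : List Char) : List Char :=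
  pvScaleRev.foldl (fun acc p => PySem.Chars.replace acc p.1 p.2) s

-- the per-song body of A's first loop: split into 4 fields, playtime formula, encode,
-- melody = scales*q + scales[:r]. none exactly where the Python raises
-- (unpack ≠ 4 fields, int() ValueError, divmod by len 0).
def pvEntry? (mi : List Char) : Option (Int × List Char × List Char) :=
  match PySem.Chars.splitOn mi [','] with
  | [st, en, title, sc] =>
    match PySem.Int.ofChars? (PySem.List.slice en (some 0) (some 2)),
          PySem.Int.ofChars? (PySem.List.slice st (some 0) (some 2)),
          PySem.Int.ofChars? (PySem.List.slice en (some 3) none),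
          PySem.Int.ofChars? (PySem.List.slice st (some 3) none) with
    | some eh, some sh, some em, some sm =>
      let playtime := (eh - sh) * 60 + (em - sm)
      let enc := pvEncode sc
      if enc.length = 0 then none
      else
        let q := PySem.Int.floordiv playtime (enc.length : Int)
        let r := PySem.Int.mod playtime (enc.length : Int)
        some (playtime, title, PySem.List.pyRepeat enc q ++ PySem.List.slice enc none (some r))
    | _, _, _, _ => none
  | _ => none

def solution (m : String) (musicinfos : List String) : String :=
  let musicList : List (Int × List Char × List Char) :=
    musicinfos.foldl (fun acc mi =>
      match pvEntry? mi.toList with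
      | some t => acc ++ [t]
      | none => acc) []
  let mE := pvEncode m.toList
  match (PySem.List.sorted musicList (fun t => t.1) true).find?
          (fun t => PySem.Chars.isIn mE t.2.2) with
  | some t => String.ofList t.2.1
  | none => "(None)"

-- ===== PORT B =====
-- PAIRS, in forward order
def pvPairsB : List (List Char × List Char) :=
  [(['C'],['0']), (['C','#'],['1']), (['D'],['2']), (['D','#'],['3']), (['E'],['4']),
   (['F'],['5']), (['F','#'],['6']), (['G'],['7']), (['G','#'],['8']), (['A'],['9']),
   (['A','#'],['a']), (['B'],['b'])]

-- _encode(s, rules): recursion "apply the remaining rules first, then rules[0]" = foldr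
def pvEncodeB (s : List Char) : List Char :=
  pvPairsB.foldr (fun p acc => PySem.Chars.replace acc p.1 p.2) s

-- _minutes(t) = int(t[0:2]) * 60 + int(t[3:]); none where int() raises
def pvMin? (t : List Char) : Option Int :=
  match PySem.Int.ofChars? (PySem.List.slice t (some 0) (some 2)),
        PySem.Int.ofChars? (PySem.List.slice t (some 3) none) with
  | some h, some mn => some (h * 60 + mn)
  | _, _ => none

-- _song(info): (playtime, title, melody); none exactly where the Python raises
def pvSongB? (info : List Char) : Option (Int × String × List Char) :=
  match PySem.Chars.splitOn info [','] with
  | [st, en, title, sc] =>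
    match pvMin? en, pvMin? st with
    | some e, some s =>
      let playtime := e - s
      let code := pvEncodeB sc
      if code.length = 0 then none
      else
        let q := PySem.Int.floordiv playtime (code.length : Int)
        let r := PySem.Int.mod playtime (code.length : Int)
        some (playtime, String.ofList title,
              PySem.List.pyRepeat code q ++ PySem.List.slice code none (some r))
    | _, _ => none
  | _ => none

-- the for-loop over musicinfos, as structural recursion carrying `best`
def pvBestGo (query : List Char) : List String → Option (Int × String) → Option (Int × String)
  | [], best => best
  | info :: rest, best =>
    pvBestGo query rest
      (match pvSongB? info.toList with
       | some (playtime, title, melody) =>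
         if PySem.Chars.isIn query melody &&
            (match best with | none => true | some b => decide (b.1 < playtime))
         then some (playtime, title) else best
       | none => best)

def solution_alt (m : String) (musicinfos : List String) : String :=
  let query := pvEncodeB m.toList
  match pvBestGo query musicinfos none with
  | some b => b.2
  | none => "(None)"

-- ===== PRECONDITION & SPEC =====
-- Pre_ excludes exactly the inputs on which Python A raises: a musicinfo that does not split at ',' into
-- exactly 4 fields (unpack ValueError), a time field whose [0:2] / [3:] slice is not int()-parsable
-- (ValueError), or an empty scales field (ZeroDivisionError in divmod).
def Pre_solution (_m : String) (musicinfos : List String) : Prop :=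
  ∀ mi ∈ musicinfos,
    (PySem.Chars.splitOn mi.toList [',']).length = 4 ∧
    (PySem.Int.ofChars? (PySem.List.slice ((PySem.Chars.splitOn mi.toList [',']).getD 0 []) (some 0) (some 2))).isSome ∧
    (PySem.Int.ofChars? (PySem.List.slice ((PySem.Chars.splitOn mi.toList [',']).getD 1 []) (some 0) (some 2))).isSome ∧
    (PySem.Int.ofChars? (PySem.List.slice ((PySem.Chars.splitOn mi.toList [',']).getD 0 []) (some 3) none)).isSome ∧
    (PySem.Int.ofChars? (PySem.List.slice ((PySem.Chars.splitOn mi.toList [',']).getD 1 []) (some 3) none)).isSome ∧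
    (PySem.Chars.splitOn mi.toList [',']).getD 3 [] ≠ []
instance (m : String) (musicinfos : List String) : Decidable (Pre_solution m musicinfos) := by
  unfold Pre_solution; infer_instance

def pvWitness_solution : String × List String :=
  ("ABC", ["12:00,12:03,HELLO,C#BCC#BCC#BCC#B", "13:00,13:05,WORLD,ABCDEF"])

def Spec_solution (m : String) (musicinfos : List String) (out : String) : Prop := out = solution_alt m musicinfos
instance (m : String) (musicinfos : List String) (out : String) : Decidable (Spec_solution m musicinfos out) := by unfold Spec_solution; infer_instance

-- ===== CLAIM (what is proved, stated in full; the proofs are below) =====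
def Claim_equal_solution : Prop := ∀ (m : String) (musicinfos : List String), Dom_solution m musicinfos → Pre_solution m musicinfos → Spec_solution m musicinfos (solution m musicinfos)

-- ===== LEMMAS AND PROOFS =====

-- the two encodings are the same 12 nested replaces
set_option maxHeartbeats 1000000 in
theorem pv_encodeB_eq (s : List Char) : pvEncodeB s = pvEncode s := by
  simp only [pvEncodeB, pvEncode, pvPairsB, pvScaleRev, List.foldr_cons, List.foldr_nil,
    List.foldl_cons, List.foldl_nil]

-- playtime: difference of absolute minutes = A's componentwise formula
theorem pv_pt_eq (eh sh em sm : Int) : eh * 60 + em - (sh * 60 + sm) = (eh - sh) * 60 + (em - sm) := by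
  ring

-- B's song equals A's entry with the title stringified
theorem pv_songB_eq (mi : List Char) :
    pvSongB? mi = (pvEntry? mi).map (fun t => (t.1, String.ofList t.2.1, t.2.2)) := by
  unfold pvSongB? pvEntry? pvMin?
  cases PySem.Chars.splitOn mi [','] with
  | nil => rfl
  | cons a l =>
    match l with
    | [] => rfl
    | [_] => rfl
    | [_, _] => rfl
    | [en0, _, sc0] =>
      cases h1 : PySem.Int.ofChars? (PySem.List.slice en0 (some 0) (some 2)) <;>
      cases h2 : PySem.Int.ofChars? (PySem.List.slice a (some 0) (some 2)) <;>
      cases h3 : PySem.Int.ofChars? (PySem.List.slice en0 (some 3) none) <;>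
      cases h4 : PySem.Int.ofChars? (PySem.List.slice a (some 3) none) <;>
        simp only [h1, h2, h3, h4, pv_encodeB_eq, pv_pt_eq, Option.map_none]
      split <;> rfl
    | _ :: _ :: _ :: _ :: _ => rfl

-- abbreviation used only by the proofs
def pvStep (P : Int × List Char × List Char → Bool)
    (b : Option (Int × String)) (t : Int × List Char × List Char) : Option (Int × String) :=
  if P t && (match b with | none => true | some bb => decide (bb.1 < t.1))
  then some (t.1, String.ofList t.2.1) else b

-- A's appending loop is filterMap
theorem pv_foldl_append_entry (l : List String) (acc : List (Int × List Char × List Char)) :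
    l.foldl (fun acc mi =>
      match pvEntry? mi.toList with
      | some t => acc ++ [t]
      | none => acc) acc = acc ++ l.filterMap (fun mi => pvEntry? mi.toList) := by
  induction l generalizing acc with
  | nil => simp
  | cons x xs ih =>
    simp only [List.foldl_cons, List.filterMap_cons]
    cases h : pvEntry? x.toList with
    | none => simp [ih]
    | some t => simp [ih]

-- B's recursion is the pvStep fold over the filterMap of A-entries
theorem pv_go_eq_fold (query : List Char) (l : List String) (b : Option (Int × String)) :
    pvBestGo query l b
      = (l.filterMap (fun mi => pvEntry? mi.toList)).foldl
          (pvStep (fun t => PySem.Chars.isIn query t.2.2)) b := by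
  induction l generalizing b with
  | nil => rfl
  | cons x xs ih =>
    simp only [pvBestGo, List.filterMap_cons, pv_songB_eq]
    cases h : pvEntry? x.toList with
    | none => simp [ih]
    | some t => simp [ih, pvStep]

-- one insertion step: finding the first match in the stably-inserted list is one pvStep
theorem pv_find_insertBy (P : Int × List Char × List Char → Bool)
    (S : List (Int × List Char × List Char)) (e : Int × List Char × List Char)
    (hS : S.Pairwise (fun a b => b.1 ≤ a.1)) :
    ((PySem.List.insertBy (fun a b => decide (b.1 < a.1)) e S).find? P).map
        (fun t => (t.1, String.ofList t.2.1))
      = pvStep P ((S.find? P).map (fun t => (t.1, String.ofList t.2.1))) e := by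
  induction S with
  | nil =>
    simp only [PySem.List.insertBy, pvStep]
    cases hP : P e <;> simp [hP]
  | cons y ys ih =>
    have hy : ∀ b ∈ ys, b.1 ≤ y.1 := (List.pairwise_cons.mp hS).1
    have hys : ys.Pairwise (fun a b => b.1 ≤ a.1) := (List.pairwise_cons.mp hS).2
    by_cases hlt : y.1 < e.1
    · have hins : PySem.List.insertBy (fun a b => decide (b.1 < a.1)) e (y :: ys) = e :: y :: ys := by
        simp [PySem.List.insertBy, hlt]
      rw [hins]
      cases hP : P e with
      | false =>
        have hL : List.find? P (e :: y :: ys) = List.find? P (y :: ys) := by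
          simp [List.find?_cons, hP]
        rw [hL]
        cases hfind : (y :: ys).find? P <;> simp [pvStep, hP]
      | true =>
        have hL : List.find? P (e :: y :: ys) = some e := by
          simp [hP]
        rw [hL]
        cases hfind : (y :: ys).find? P with
        | none => simp [pvStep, hP]
        | some t =>
          have ht : t ∈ y :: ys := List.mem_of_find?_eq_some hfind
          have htle : t.1 ≤ y.1 := by
            rcases List.mem_cons.mp ht with h | h
            · exact le_of_eq (by rw [h])
            · exact hy t h
          have hte : t.1 < e.1 := lt_of_le_of_lt htle hlt
          simp [pvStep, hP, hte]
    · have hins : PySem.List.insertBy (fun a b => decide (b.1 < a.1)) e (y :: ys) =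
          y :: PySem.List.insertBy (fun a b => decide (b.1 < a.1)) e ys := by
        simp [PySem.List.insertBy, hlt]
      rw [hins]
      cases hPy : P y with
      | true => simp [hPy, pvStep, hlt]
      | false => simp [hPy, ih hys]

-- the one-pass best fold computes the first match of the stable descending sort
theorem pv_fold_eq_sorted_find (P : Int × List Char × List Char → Bool)
    (L : List (Int × List Char × List Char)) :
    L.foldl (pvStep P) none
      = ((PySem.List.sorted L (fun t => t.1) true).find? P).map (fun t => (t.1, String.ofList t.2.1)) := by
  induction L using List.reverseRecOn with
  | nil => simp [PySem.List.sorted]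
  | append_singleton L e ih =>
    rw [List.foldl_append, List.foldl_cons, List.foldl_nil, ih]
    have hsorted : PySem.List.sorted (L ++ [e]) (fun t => t.1) true
        = PySem.List.insertBy (fun a b => decide (b.1 < a.1)) e (PySem.List.sorted L (fun t => t.1) true) := by
      rw [PySem.List.sorted_rev_eq_foldl_insertBy, PySem.List.sorted_rev_eq_foldl_insertBy,
          List.foldl_append, List.foldl_cons, List.foldl_nil]
    rw [hsorted, pv_find_insertBy P _ e (PySem.List.sorted_pairwise_rev L (fun t => t.1))]

-- ===== VERDICT (by name: the statement is the Claim_ definition above) =====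
theorem solution_spec : Claim_equal_solution := by
  intro m musicinfos _ _
  simp only [Spec_solution, solution, solution_alt]
  rw [pv_foldl_append_entry, List.nil_append, pv_encodeB_eq,
      pv_go_eq_fold, pv_fold_eq_sorted_find]
  cases h : (PySem.List.sorted (musicinfos.filterMap (fun mi => pvEntry? mi.toList))
      (fun t => t.1) true).find? (fun t => PySem.Chars.isIn (pvEncode m.toList) t.2.2) <;>
    simp
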